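-- pv_equiv track=rewrite | github.com/lanshchekov/films-going | structure/MainPage.py | get_clean_film_title
-- ===== SOURCE A (Python) =====
-- def get_clean_film_title(film_title: str) -> str:
--     ignored_symbols = ",.!?:;-'\"/\\()"
--     res = ""
--     film_title = film_title.lower().replace('ё', 'е').replace("&quot;", '')
--     last_symbol = ''
--     for symbol in film_title:
--         if symbol in ignored_symbols:
--             continue
--         if symbol == ' ' and last_symbol == ' ':
--             continue
--         res += symbol
--         last_symbol = symbol
--     return res.strip()  # strip именно здесь, чтобы обработать все дополнительные случаи
-- ===== SOURCE B (Python) =====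
-- def get_clean_film_title(film_title: str) -> str:
--     ignored = ",.!?:;-'\"/\\()"
--     t = film_title.lower().replace('ё', 'е').replace("&quot;", '')
--     # word-level: split into space-separated fields, clean each field of the
--     # ignored symbols, drop fields that became empty, re-join with single spaces
--     words = [''.join(c for c in w if c not in ignored) for w in t.split(' ')]
--     return ' '.join(w for w in words if w).strip()
-- ===== Notes on version B (the rewrite author's own statement) =====
-- stated objective: alternative
-- what changed: Replaces A's single stateful character loop (accumulator plus last_symbol tracking) by a word-level pipeline: split the title into space-separated fields, delete the ignored symbols inside each field, drop fields that became empty, and re-join with single spaces before the final strip.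
import Mathlib
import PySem

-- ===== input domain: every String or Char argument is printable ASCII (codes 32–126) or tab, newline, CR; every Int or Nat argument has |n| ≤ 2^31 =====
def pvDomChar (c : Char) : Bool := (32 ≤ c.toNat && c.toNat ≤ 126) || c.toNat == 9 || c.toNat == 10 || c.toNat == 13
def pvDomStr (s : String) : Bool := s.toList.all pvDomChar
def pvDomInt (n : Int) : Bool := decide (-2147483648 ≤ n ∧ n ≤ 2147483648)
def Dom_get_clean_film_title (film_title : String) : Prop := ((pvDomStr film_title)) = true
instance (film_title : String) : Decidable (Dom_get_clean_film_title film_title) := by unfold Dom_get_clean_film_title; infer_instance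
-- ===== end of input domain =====

-- B replaces A's stateful character loop (last_symbol tracking) by a word-level pipeline:
-- split on ' ', clean each field of punctuation, drop empty fields, re-join; objective: alternative.

-- ===== PORT A =====
def get_clean_film_title (film_title : String) : String :=
  let ignored_symbols : List Char := ",.!?:;-'\"/\\()".toList
  let ft := PySem.Str.replace (PySem.Str.replace (PySem.Str.lower film_title) "ё" "е") "&quot;" ""
  let r :=
    ft.toList.foldl
      (fun (st : List Char × Option Char) symbol =>
        if symbol ∈ ignored_symbols then st
        else if symbol = ' ' ∧ st.2 = some ' ' then st
        else (st.1 ++ [symbol], some symbol))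
      ([], none)
  String.ofList (PySem.Chars.strip r.1)

-- ===== PORT B =====
def get_clean_film_title_alt (film_title : String) : String :=
  let ignored : List Char := ",.!?:;-'\"/\\()".toList
  let t := PySem.Str.replace (PySem.Str.replace (PySem.Str.lower film_title) "ё" "е") "&quot;" ""
  -- words = [''.join(c for c in w if c not in ignored) for w in t.split(' ')]
  let words := (PySem.Chars.splitOn t.toList [' ']).map
      (fun w => w.filter (fun c => !(ignored.contains c)))
  -- ' '.join(w for w in words if w).strip()
  String.ofList (PySem.Chars.strip (PySem.Chars.join [' '] (words.filter (fun w => w ≠ []))))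

-- ===== PRECONDITION & SPEC =====
def Spec_get_clean_film_title (film_title : String) (out : String) : Prop := out = get_clean_film_title_alt film_title
instance (film_title : String) (out : String) : Decidable (Spec_get_clean_film_title film_title out) := by unfold Spec_get_clean_film_title; infer_instance

-- ===== CLAIM (what is proved, stated in full; the proofs are below) =====
def Claim_equal_get_clean_film_title : Prop := ∀ (film_title : String), Dom_get_clean_film_title film_title → Spec_get_clean_film_title film_title (get_clean_film_title film_title)

-- ===== LEMMAS AND PROOFS =====

-- A's collapse loop as a recursion: state = last kept character
def pvCollapse (last : Option Char) : List Char → List Char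
  | [] => []
  | c :: cs => if c = ' ' ∧ last = some ' ' then pvCollapse last cs else c :: pvCollapse (some c) cs

-- structural model of PySem.Chars.splitOn · [' ']
def pvSplitSp : List Char → List (List Char)
  | [] => [[]]
  | c :: cs => if c = ' ' then [] :: pvSplitSp cs else (pvSplitSp cs).modifyHead (c :: ·)

-- B's join-of-nonempty-fields on an already split list
def pvN (v : List Char) : List Char :=
  PySem.Chars.join [' '] ((pvSplitSp v).filter (· ≠ []))

theorem pv_modifyHead_id {α : Type} (l : List α) : List.modifyHead (fun x => x) l = l := by
  cases l <;> simp

theorem pv_sp_ne_nil (v : List Char) : pvSplitSp v ≠ [] := by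
  induction v with
  | nil => simp [pvSplitSp]
  | cons c cs ih =>
    simp only [pvSplitSp]
    split
    · simp
    · cases h : pvSplitSp cs with
      | nil => exact absurd h ih
      | cons a l => simp [h]

theorem pv_sp_cons_split (c : Char) (cs : List Char) :
    ∃ q ps, pvSplitSp cs = q :: ps := by
  cases h : pvSplitSp cs with
  | nil => exact absurd h (pv_sp_ne_nil cs)
  | cons a l => exact ⟨a, l, rfl⟩

-- splitOn's fuel loop, characterized
theorem pv_go_spec (s : List Char) : ∀ (fuel : Nat) (cur : List Char) (acc : List (List Char)),
    s.length ≤ fuel →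
    PySem.Chars.splitOn.go [' '] fuel s cur acc
      = acc.reverse ++ (pvSplitSp s).modifyHead (cur.reverse ++ ·) := by
  induction s with
  | nil =>
    intro fuel cur acc _
    cases fuel <;> simp [PySem.Chars.splitOn.go.eq_def, pvSplitSp]
  | cons c cs ih =>
    intro fuel cur acc h
    cases fuel with
    | zero => simp at h
    | succ f =>
      rw [PySem.Chars.splitOn.go.eq_def]
      by_cases hc : c = ' '
      · subst hc
        simp only [List.isPrefixOf, List.isPrefixOf_nil_left, beq_self_eq_true, Bool.true_and,
          if_pos]
        rw [show List.drop [' '].length (' ' :: cs) = cs from rfl]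
        rw [ih f [] (cur.reverse :: acc) (by simpa using Nat.le_of_succ_le_succ h)]
        simp [pvSplitSp, pv_modifyHead_id]
      · have hpre : ([' '].isPrefixOf (c :: cs)) = false := by
          simp [List.isPrefixOf]
          exact fun h' => absurd h'.symm hc
        simp only [hpre, Bool.false_eq_true, if_false]
        rw [ih f (c :: cur) acc (by simpa using Nat.le_of_succ_le_succ h)]
        simp only [pvSplitSp, if_neg hc, List.modifyHead_modifyHead]
        congr 1
        obtain ⟨q, ps, hsp⟩ := pv_sp_cons_split c cs
        simp [hsp, Function.comp]

theorem pv_splitOn_eq (s : List Char) : PySem.Chars.splitOn s [' '] = pvSplitSp s := by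
  show PySem.Chars.splitOn.go [' '] (s.length + 1) s [] [] = pvSplitSp s
  rw [pv_go_spec s (s.length + 1) [] [] (by omega)]
  simp [pv_modifyHead_id]

-- deleting non-space characters commutes with splitting on spaces
theorem pv_map_filter_sp (p : Char → Bool) (hp : p ' ' = true) (t : List Char) :
    (pvSplitSp t).map (List.filter p) = pvSplitSp (t.filter p) := by
  induction t with
  | nil => simp [pvSplitSp]
  | cons c cs ih =>
    by_cases hc : c = ' '
    · subst hc
      rw [List.filter_cons, if_pos (by simp [hp])]
      simp [pvSplitSp, ih]
    · obtain ⟨q, ps, hsp⟩ := pv_sp_cons_split c cs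
      rw [hsp] at ih
      by_cases hpc : p c = true
      · rw [List.filter_cons, if_pos (by simp [hpc])]
        simp only [pvSplitSp, if_neg hc, hsp, List.modifyHead_cons, List.map_cons]
        rw [← ih]
        simp [List.filter_cons, hpc]
      · have hpc' : p c = false := by simpa using hpc
        rw [List.filter_cons, if_neg (by simp [hpc'])]
        simp only [pvSplitSp, if_neg hc, hsp, List.modifyHead_cons, List.map_cons]
        rw [← ih]
        simp [List.filter_cons, hpc']

-- A's loop over the already-filtered text equals pvCollapse
theorem pv_loop_C (t : List Char) (acc : List Char) (last : Option Char) :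
    (t.foldl
      (fun (st : List Char × Option Char) symbol =>
        if symbol = ' ' ∧ st.2 = some ' ' then st
        else (st.1 ++ [symbol], some symbol))
      (acc, last)).1
    = acc ++ pvCollapse last t := by
  induction t generalizing acc last with
  | nil => simp [pvCollapse]
  | cons c cs ih =>
    simp only [List.foldl_cons, pvCollapse]
    by_cases h : c = ' ' ∧ last = some ' '
    · rw [if_pos h, if_pos h, ih]
    · rw [if_neg h, if_neg h]
      simpa using ih (acc ++ [c]) (some c)

-- the punctuation test in A's loop turned into a filter
theorem pv_filter_step (cs : List Char) :
    cs.foldl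
      (fun (st : List Char × Option Char) symbol =>
        if symbol ∈ (",.!?:;-'\"/\\()".toList) then st
        else if symbol = ' ' ∧ st.2 = some ' ' then st
        else (st.1 ++ [symbol], some symbol))
      ([], none)
    = (cs.filter (fun c => !(",.!?:;-'\"/\\()".toList.contains c))).foldl
      (fun (st : List Char × Option Char) symbol =>
        if symbol = ' ' ∧ st.2 = some ' ' then st
        else (st.1 ++ [symbol], some symbol))
      ([], none) := by
  rw [← PySem.List.foldl_if_eq_foldl_filter]
  apply PySem.List.foldl_congr_mem
  intro st x _
  have h1 : ((!(",.!?:;-'\"/\\()".toList.contains x)) = true) ↔ x ∉ (",.!?:;-'\"/\\()".toList) := by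
    simp only [List.contains_eq_mem, Bool.not_eq_true', decide_eq_false_iff_not]
  by_cases hx : x ∈ (",.!?:;-'\"/\\()".toList)
  · rw [if_pos hx, if_neg (fun hh => (h1.mp hh) hx)]
  · rw [if_neg hx, if_pos (h1.mpr hx)]

-- pvCollapse state facts
theorem pv_C_nonspace (c : Char) (hc : c ≠ ' ') (v : List Char) :
    pvCollapse (some c) v = pvCollapse none v := by
  cases v with
  | nil => rfl
  | cons d ds =>
    simp only [pvCollapse]
    rw [if_neg (by rintro ⟨_, h⟩; exact hc (by injection h)), if_neg (by rintro ⟨_, h⟩; cases h)]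

theorem pv_C_space (v : List Char) :
    pvCollapse (some ' ') v = pvCollapse none (v.dropWhile (fun x => x = ' ')) := by
  induction v with
  | nil => rfl
  | cons d ds ih =>
    by_cases hd : d = ' '
    · subst hd
      simp [pvCollapse, List.dropWhile_cons, ih]
    · simp only [pvCollapse, List.dropWhile_cons]
      rw [if_neg (fun h => hd h.1)]
      rw [if_neg (by simpa using hd)]
      simp only [pvCollapse]
      rw [if_neg (by rintro ⟨_, h⟩; cases h)]

-- pvN facts
theorem pv_N_space (cs : List Char) : pvN (' ' :: cs) = pvN cs := by
  simp [pvN, pvSplitSp]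

theorem pv_filter_sp_dropWhile (ds : List Char) :
    (pvSplitSp ds).filter (· ≠ []) = (pvSplitSp (ds.dropWhile (fun x => x = ' '))).filter (· ≠ []) := by
  induction ds with
  | nil => rfl
  | cons d ds ih =>
    by_cases hd : d = ' '
    · subst hd
      simp only [pvSplitSp, if_pos rfl, List.dropWhile_cons, decide_true, if_pos]
      rw [← ih]
      simp
    · simp [List.dropWhile_cons, hd]

theorem pv_N_dropWhile (v : List Char) :
    pvN v = pvN (v.dropWhile (fun x => x = ' ')) := by
  unfold pvN
  rw [pv_filter_sp_dropWhile]

theorem pv_join_cons (a : List Char) (R : List (List Char)) :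
    PySem.Chars.join [' '] (a :: R)
      = a ++ (if R = [] then [] else ' ' :: PySem.Chars.join [' '] R) := by
  cases R with
  | nil => simp [PySem.Chars.join_singleton]
  | cons r rs => simp [PySem.Chars.join_cons_cons]

theorem pv_filter_cons_ne_nil {x : List Char} (hx : x ≠ []) (R : List (List Char)) :
    (x :: R).filter (· ≠ []) = x :: R.filter (· ≠ []) := by
  simp [List.filter_cons, hx]

theorem pv_filter_cons_nil (R : List (List Char)) :
    (([] : List Char) :: R).filter (· ≠ []) = R.filter (· ≠ []) := by
  simp [List.filter_cons]

theorem pv_N_cons_nonspace (c : Char) (cs : List Char) (hc : c ≠ ' ')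
    (hcs : cs.head? ≠ some ' ') : pvN (c :: cs) = c :: pvN cs := by
  cases cs with
  | nil =>
    simp [pvN, pvSplitSp, hc, List.filter_cons, PySem.Chars.join_singleton,
      PySem.Chars.join_nil]
  | cons d ds =>
    have hd : d ≠ ' ' := fun h => hcs (by rw [h]; rfl)
    obtain ⟨q', ps', hsp'⟩ := pv_sp_cons_split d ds
    have h1 : pvSplitSp (d :: ds) = (d :: q') :: ps' := by simp [pvSplitSp, hd, hsp']
    have h2 : pvSplitSp (c :: d :: ds) = (c :: d :: q') :: ps' := by
      simp [pvSplitSp, hc, hd, hsp']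
    unfold pvN
    rw [h1, h2, pv_filter_cons_ne_nil (by simp), pv_filter_cons_ne_nil (by simp)]
    rw [pv_join_cons, pv_join_cons]
    simp

-- strip facts
theorem pv_strip_cons_ws (w : Char) (hw : PySem.Chars.isspace w = true) (x : List Char) :
    PySem.Chars.strip (w :: x) = PySem.Chars.strip x := by
  simp [PySem.Chars.strip, PySem.Chars.lstrip, List.dropWhile_cons, hw]

theorem pv_strip_append_space (x : List Char) :
    PySem.Chars.strip (x ++ [' ']) = PySem.Chars.strip x := by
  unfold PySem.Chars.strip PySem.Chars.lstrip PySem.Chars.rstrip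
  rw [List.dropWhile_append]
  by_cases h : (List.dropWhile PySem.Chars.isspace x).isEmpty = true
  · rw [if_pos h]
    have hx : List.dropWhile PySem.Chars.isspace x = [] := by simpa [List.isEmpty_iff] using h
    rw [hx]
    simp [List.dropWhile_cons, PySem.Chars.isspace]
  · rw [if_neg h]
    simp [List.dropWhile_cons, PySem.Chars.isspace]

theorem pv_strip_N_cons_ws (w : Char) (cs : List Char) (hw : PySem.Chars.isspace w = true) :
    PySem.Chars.strip (pvN (w :: cs)) = PySem.Chars.strip (pvN cs) := by
  by_cases hwsp : w = ' '
  · rw [hwsp, pv_N_space]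
  · obtain ⟨p0, ps, hsp⟩ := pv_sp_cons_split w cs
    have hstruct : pvSplitSp (w :: cs) = (w :: p0) :: ps := by simp [pvSplitSp, hwsp, hsp]
    cases hp0 : p0 with
    | nil =>
      subst hp0
      have hNcs : pvN cs = PySem.Chars.join [' '] (ps.filter (· ≠ [])) := by
        unfold pvN; rw [hsp, pv_filter_cons_nil]
      have hNw : pvN (w :: cs)
          = PySem.Chars.join [' '] ([w] :: ps.filter (· ≠ [])) := by
        unfold pvN; rw [hstruct, pv_filter_cons_ne_nil (by simp)]
      by_cases hfe : ps.filter (· ≠ []) = []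
      · rw [hNcs, hNw, hfe, PySem.Chars.join_singleton, PySem.Chars.join_nil]
        simp [PySem.Chars.strip, PySem.Chars.lstrip, List.dropWhile_cons, hw,
          PySem.Chars.rstrip]
      · rw [hNcs, hNw, pv_join_cons, if_neg hfe]
        simp only [List.singleton_append]
        rw [pv_strip_cons_ws w hw, pv_strip_cons_ws ' ' (by simp [PySem.Chars.isspace])]
    | cons e q =>
      subst hp0
      have hNw : pvN (w :: cs) = w :: pvN cs := by
        unfold pvN
        rw [hstruct, hsp, pv_filter_cons_ne_nil (by simp), pv_filter_cons_ne_nil (by simp)]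
        rw [pv_join_cons, pv_join_cons]
        simp
      rw [hNw, pv_strip_cons_ws w hw]

-- dropWhile's head does not satisfy the predicate
theorem pv_dropWhile_head_ne (l : List Char) (e : Char) (es : List Char)
    (h : l.dropWhile (fun x => x = ' ') = e :: es) : e ≠ ' ' := by
  have := List.head?_dropWhile_not (fun x => decide (x = ' ')) l
  rw [show (fun x => decide (x = ' ')) = (fun x : Char => x = ' ') from rfl, h] at this
  simpa using this

-- core: the collapsed text equals the joined fields, up to one trailing space,
-- when the text does not start with a space
theorem pv_K : ∀ (n : Nat) (v : List Char), v.length ≤ n → v.head? ≠ some ' ' →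
    pvCollapse none v = pvN v ∨ pvCollapse none v = pvN v ++ [' '] := by
  intro n
  induction n with
  | zero =>
    intro v hv _
    have : v = [] := by cases v <;> simp_all
    subst this
    left; simp [pvCollapse, pvN, pvSplitSp, PySem.Chars.join_nil]
  | succ n ih =>
    intro v hv hhead
    cases v with
    | nil => left; simp [pvCollapse, pvN, pvSplitSp, PySem.Chars.join_nil]
    | cons c cs =>
      have hc : c ≠ ' ' := by intro h; exact hhead (by rw [h]; rfl)
      cases cs with
      | nil =>
        left
        have hc1 : pvCollapse none [c] = [c] := by
          simp only [pvCollapse]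
          rw [if_neg (by rintro ⟨_, h⟩; cases h)]
        rw [hc1]
        simp [pvN, pvSplitSp, hc, PySem.Chars.join_singleton]
      | cons d ds =>
        by_cases hd : d = ' '
        · subst hd
          have hC : pvCollapse none (c :: ' ' :: ds)
              = c :: ' ' :: pvCollapse none (ds.dropWhile (fun x => x = ' ')) := by
            simp only [pvCollapse]
            rw [if_neg (by rintro ⟨_, h⟩; cases h)]
            rw [if_neg (by rintro ⟨_, h⟩; exact hc (by injection h))]
            rw [pv_C_space]
          have hsplit : pvSplitSp (c :: ' ' :: ds) = [c] :: pvSplitSp ds := by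
            simp [pvSplitSp, hc]
          cases hw : ds.dropWhile (fun x => x = ' ') with
          | nil =>
            right
            have hfds : (pvSplitSp ds).filter (· ≠ []) = [] := by
              rw [pv_filter_sp_dropWhile, hw]
              simp [pvSplitSp]
            have hN : pvN (c :: ' ' :: ds) = [c] := by
              have hflt2 : (pvSplitSp (c :: ' ' :: ds)).filter (· ≠ []) = [[c]] := by
                rw [hsplit, pv_filter_cons_ne_nil (by simp), hfds]
              have h2 := congrArg (PySem.Chars.join [' ']) hflt2
              rw [PySem.Chars.join_singleton] at h2
              exact h2
            rw [hC, hw, hN]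
            simp [pvCollapse]
          | cons e es =>
            have he : e ≠ ' ' := pv_dropWhile_head_ne ds e es hw
            obtain ⟨q', ps', hsp'⟩ := pv_sp_cons_split e es
            have hspw : pvSplitSp (e :: es) = (e :: q') :: ps' := by simp [pvSplitSp, he, hsp']
            have hfds : (pvSplitSp ds).filter (· ≠ [])
                = (e :: q') :: ps'.filter (· ≠ []) := by
              rw [pv_filter_sp_dropWhile, hw, hspw, pv_filter_cons_ne_nil (by simp)]
            have hflt : (pvSplitSp (e :: es)).filter (· ≠ []) = (e :: q') :: ps'.filter (· ≠ []) := by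
              rw [hspw, pv_filter_cons_ne_nil (by simp)]
            have hNw : pvN (e :: es) = PySem.Chars.join [' '] ((e :: q') :: ps'.filter (· ≠ [])) :=
              congrArg (PySem.Chars.join [' ']) hflt
            have hN : pvN (c :: ' ' :: ds) = c :: ' ' :: pvN (e :: es) := by
              have hflt2 : (pvSplitSp (c :: ' ' :: ds)).filter (· ≠ [])
                  = [c] :: (e :: q') :: ps'.filter (· ≠ []) := by
                rw [hsplit, pv_filter_cons_ne_nil (by simp), hfds]
              have h2 := congrArg (PySem.Chars.join [' ']) hflt2
              rw [pv_join_cons, if_neg (by simp), ← hNw] at h2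
              exact h2.trans (by simp)
            have hlen : (e :: es).length ≤ n := by
              have h1 : (ds.dropWhile (fun x => x = ' ')).length ≤ ds.length :=
                List.length_dropWhile_le _ _
              rw [hw] at h1
              simp at hv
              omega
            rcases ih (e :: es) hlen (by simp [he]) with h | h
            · left; rw [hC, hw, hN, h]
            · right; rw [hC, hw, hN, h]; simp
        · have hC : pvCollapse none (c :: d :: ds) = c :: pvCollapse none (d :: ds) := by
            rw [show pvCollapse none (c :: d :: ds)
                = if c = ' ' ∧ (none : Option Char) = some ' ' then pvCollapse none (d :: ds)
                  else c :: pvCollapse (some c) (d :: ds) from rfl]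
            rw [if_neg (by rintro ⟨_, h⟩; cases h), pv_C_nonspace c hc]
          have hN : pvN (c :: d :: ds) = c :: pvN (d :: ds) :=
            pv_N_cons_nonspace c (d :: ds) hc (by simpa using hd)
          have hlen : (d :: ds).length ≤ n := by simp at hv ⊢; omega
          rcases ih (d :: ds) hlen (by simpa using hd) with h | h
          · left; rw [hC, hN, h]
          · right; rw [hC, hN, h]; simp

-- main: after strip, collapsing equals the word pipeline
theorem pv_main : ∀ (n : Nat) (v : List Char), v.length ≤ n →
    PySem.Chars.strip (pvCollapse none v) = PySem.Chars.strip (pvN v) := by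
  intro n
  induction n with
  | zero =>
    intro v hv
    have : v = [] := by cases v <;> simp_all
    subst this; rfl
  | succ n ih =>
    intro v hv
    cases v with
    | nil => rfl
    | cons c cs =>
      by_cases hsp : PySem.Chars.isspace c = true
      · by_cases hc : c = ' '
        · subst hc
          have hC : pvCollapse none (' ' :: cs)
              = ' ' :: pvCollapse none (cs.dropWhile (fun x => x = ' ')) := by
            simp only [pvCollapse]
            rw [if_neg (by rintro ⟨_, h⟩; cases h), pv_C_space]
          rw [hC, pv_strip_cons_ws ' ' (by simp [PySem.Chars.isspace]),
            pv_N_space, pv_N_dropWhile]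
          exact ih _ (by
            have := List.length_dropWhile_le (fun x => x = ' ') cs
            simp at hv; omega)
        · have hC : pvCollapse none (c :: cs) = c :: pvCollapse none cs := by
            simp only [pvCollapse]
            rw [if_neg (by rintro ⟨h, _⟩; exact hc h), pv_C_nonspace c hc]
          rw [hC, pv_strip_cons_ws c hsp, pv_strip_N_cons_ws c cs hsp]
          exact ih cs (by simp at hv; omega)
      · have hc : c ≠ ' ' := by
          intro h; rw [h] at hsp; exact hsp (by simp [PySem.Chars.isspace])
        rcases pv_K (c :: cs).length (c :: cs) le_rfl (by simp [hc]) with h | h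
        · rw [h]
        · rw [h, pv_strip_append_space]

-- assembling both ports
theorem pv_final (u : List Char) :
    String.ofList (PySem.Chars.strip (pvCollapse none u))
      = String.ofList (PySem.Chars.strip
          (PySem.Chars.join [' '] ((pvSplitSp u).filter (fun w => w ≠ [])))) := by
  have h := pv_main u.length u le_rfl
  unfold pvN at h
  exact congrArg String.ofList h

theorem get_clean_film_title_eq (film_title : String) :
    get_clean_film_title film_title = get_clean_film_title_alt film_title := by
  unfold get_clean_film_title get_clean_film_title_alt
  dsimp only
  rw [pv_filter_step, pv_loop_C, List.nil_append]
  rw [pv_splitOn_eq, pv_map_filter_sp _ (by decide)]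
  exact pv_final _

-- ===== VERDICT (by name: the statement is the Claim_ definition above) =====
theorem get_clean_film_title_spec : Claim_equal_get_clean_film_title := by
  intro film_title _
  unfold Spec_get_clean_film_title
  exact get_clean_film_title_eq film_title
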